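-- pv_equiv track=rewrite | github.com/Healingl/ASTCMSeg | cardiac_code/2_TargetDomainSTSeg/lib/dataloader/medical_loader_utils.py | get_sample_point_list_between_min_max_idx
-- ===== SOURCE A (Python) =====
-- def get_sample_point_list_between_min_max_idx(min_dix, max_idx, crop_length, sliding_step):
--     min_dix_list = [min_dix]
--     while min_dix < max_idx - crop_length:
--         min_dix += sliding_step
--         if min_dix > max_idx - crop_length:
--             min_dix = max_idx - crop_length
--             min_dix_list.append(min_dix)
--             break
--         min_dix_list.append(min_dix)
--     return min_dix_list
-- ===== SOURCE B (Python) =====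
-- def get_sample_point_list_between_min_max_idx(min_dix, max_idx, crop_length, sliding_step):
--     limit = max_idx - crop_length
--     d = limit - min_dix
--     if d <= 0:
--         return [min_dix]
--     n = -(-d // sliding_step)  # ceil(d / sliding_step): number of steps to reach/pass limit
--     return [min(min_dix + i * sliding_step, limit) for i in range(n + 1)]
-- ===== Notes on version B (the rewrite author's own statement) =====
-- stated objective: alternative
-- what changed: Replaces A's incremental while/append/clamp loop with a closed-form count of windows via ceiling division and a single per-index comprehension that clamps each start with min(), so no running cursor, no conditional append and no break are needed.
import Mathlib
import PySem

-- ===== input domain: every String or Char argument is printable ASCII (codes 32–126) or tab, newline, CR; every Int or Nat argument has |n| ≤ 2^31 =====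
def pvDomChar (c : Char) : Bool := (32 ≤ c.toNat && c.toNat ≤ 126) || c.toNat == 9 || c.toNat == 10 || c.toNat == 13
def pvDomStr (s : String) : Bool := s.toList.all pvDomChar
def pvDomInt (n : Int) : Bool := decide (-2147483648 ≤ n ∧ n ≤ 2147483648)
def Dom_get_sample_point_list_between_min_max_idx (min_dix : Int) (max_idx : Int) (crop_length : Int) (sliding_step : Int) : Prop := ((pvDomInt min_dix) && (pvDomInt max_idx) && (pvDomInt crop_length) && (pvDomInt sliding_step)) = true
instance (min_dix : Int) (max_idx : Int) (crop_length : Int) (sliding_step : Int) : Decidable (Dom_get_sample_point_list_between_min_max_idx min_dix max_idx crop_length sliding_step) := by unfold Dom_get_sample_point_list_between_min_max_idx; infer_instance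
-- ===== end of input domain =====

-- B replaces A's incremental while/append/clamp loop by computing the number of windows in
-- closed form (ceiling division) and producing each start independently by index with a
-- per-element min() clamp (objective: alternative).

-- ===== PORT A =====
-- A's while loop; the `0 < step` conjunct in the guard only makes the recursion total
-- (Python diverges for step ≤ 0 with cur < limit; those inputs are outside Pre_).
def gsLoopA (limit step cur : Int) (acc : List Int) : List Int :=
  if _h : cur < limit ∧ 0 < step then
    let m := cur + step
    if m > limit then acc ++ [limit]
    else gsLoopA limit step m (acc ++ [m])
  else acc
termination_by (limit - cur).toNat
decreasing_by omega

def get_sample_point_list_between_min_max_idx (min_dix : Int) (max_idx : Int) (crop_length : Int) (sliding_step : Int) : List Int :=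
  gsLoopA (max_idx - crop_length) sliding_step min_dix [min_dix]

-- ===== PORT B =====
def get_sample_point_list_between_min_max_idx_alt (min_dix : Int) (max_idx : Int) (crop_length : Int) (sliding_step : Int) : List Int :=
  let limit := max_idx - crop_length
  let d := limit - min_dix
  if d ≤ 0 then [min_dix]
  else
    let n := -(PySem.Int.floordiv (-d) sliding_step)
    (PySem.List.pyRange 0 (n + 1) 1).map (fun i => min (min_dix + i * sliding_step) limit)

-- ===== PRECONDITION & SPEC =====
-- Pre_ excludes exactly the inputs where Python A loops forever: sliding_step ≤ 0 while
-- min_dix < max_idx - crop_length. A returns on everything Pre_ admits.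
def Pre_get_sample_point_list_between_min_max_idx (min_dix : Int) (max_idx : Int) (crop_length : Int) (sliding_step : Int) : Prop :=
  max_idx - crop_length ≤ min_dix ∨ 0 < sliding_step
instance (min_dix : Int) (max_idx : Int) (crop_length : Int) (sliding_step : Int) : Decidable (Pre_get_sample_point_list_between_min_max_idx min_dix max_idx crop_length sliding_step) := by unfold Pre_get_sample_point_list_between_min_max_idx; infer_instance

def pvWitness_get_sample_point_list_between_min_max_idx : Int × Int × Int × Int := (0, 10, 3, 2)

def Spec_get_sample_point_list_between_min_max_idx (min_dix : Int) (max_idx : Int) (crop_length : Int) (sliding_step : Int) (out : List Int) : Prop := out = get_sample_point_list_between_min_max_idx_alt min_dix max_idx crop_length sliding_step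
instance (min_dix : Int) (max_idx : Int) (crop_length : Int) (sliding_step : Int) (out : List Int) : Decidable (Spec_get_sample_point_list_between_min_max_idx min_dix max_idx crop_length sliding_step out) := by unfold Spec_get_sample_point_list_between_min_max_idx; infer_instance

-- ===== CLAIM (what is proved, stated in full; the proofs are below) =====
def Claim_equal_get_sample_point_list_between_min_max_idx : Prop := ∀ (min_dix : Int) (max_idx : Int) (crop_length : Int) (sliding_step : Int), Dom_get_sample_point_list_between_min_max_idx min_dix max_idx crop_length sliding_step → Pre_get_sample_point_list_between_min_max_idx min_dix max_idx crop_length sliding_step → Spec_get_sample_point_list_between_min_max_idx min_dix max_idx crop_length sliding_step (get_sample_point_list_between_min_max_idx min_dix max_idx crop_length sliding_step)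

-- ===== LEMMAS AND PROOFS =====

theorem pyRange_cons_of_pos {s : Int} (a b : Int) (hs : 0 < s) (hab : a < b) :
    PySem.List.pyRange a b s = a :: PySem.List.pyRange (a + s) b s := by
  rw [PySem.List.pyRange_of_pos a b hs, PySem.List.pyRange_of_pos (a + s) b hs]
  by_cases h : a + s < b
  · have hn : (if a < b then ((b - a + s - 1) / s).toNat else 0)
        = (if a + s < b then ((b - (a + s) + s - 1) / s).toNat else 0) + 1 := by
      simp only [if_pos hab, if_pos h]
      have : b - a + s - 1 = (b - (a + s) + s - 1) + 1 * s := by ring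
      rw [this, Int.add_mul_ediv_right _ _ (by omega : s ≠ 0)]
      have h0 : 0 ≤ (b - (a + s) + s - 1) / s := by
        apply Int.ediv_nonneg <;> omega
      omega
    rw [hn, List.range_succ_eq_map]
    simp only [List.map_cons, List.map_map]
    refine List.cons_eq_cons.mpr ⟨by ring, ?_⟩
    apply List.map_congr_left
    intro k _
    simp [Function.comp]
    ring
  · have hn : (if a < b then ((b - a + s - 1) / s).toNat else 0) = 1 := by
      rw [if_pos hab]
      have h1 : (b - a + s - 1) / s = 1 := by
        have he : b - a + s - 1 = (b - a - 1) + 1 * s := by ring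
        rw [he, Int.add_mul_ediv_right _ _ (by omega : s ≠ 0),
          Int.ediv_eq_zero_of_lt (by omega) (by omega)]
        omega
      omega
    simp [hn, if_neg h]

theorem pyRange_nil_of_ge {s : Int} (a b : Int) (hs : 0 < s) (hab : b ≤ a) :
    PySem.List.pyRange a b s = [] := by
  rw [PySem.List.pyRange_of_pos a b hs, if_neg (by omega)]
  simp

-- A's loop in closed range form
theorem gsLoopA_eq (limit s : Int) (hs : 0 < s) :
    ∀ cur acc, cur < limit →
      gsLoopA limit s cur acc = acc ++ PySem.List.pyRange (cur + s) limit s ++ [limit] := by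
  intro cur acc hcur
  rw [gsLoopA, dif_pos ⟨hcur, hs⟩]
  by_cases hgt : cur + s > limit
  · rw [if_pos hgt, pyRange_nil_of_ge _ _ hs (by omega)]
    simp
  · rw [if_neg hgt]
    by_cases heq : cur + s < limit
    · rw [gsLoopA_eq limit s hs (cur + s) (acc ++ [cur + s]) heq,
        pyRange_cons_of_pos _ _ hs heq]
      simp
    · have hlim : cur + s = limit := by omega
      rw [gsLoopA, dif_neg (by omega)]
      rw [pyRange_nil_of_ge _ _ hs (by omega)]
      simp [hlim]
termination_by cur => (limit - cur).toNat
decreasing_by omega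

-- B's clamped comprehension in the same closed range form
theorem mapform_eq (m limit s : Int) (hs : 0 < s) (hlt : m < limit) :
    (PySem.List.pyRange 0 (-(PySem.Int.floordiv (-(limit - m)) s) + 1) 1).map
        (fun i => min (m + i * s) limit)
      = m :: (PySem.List.pyRange (m + s) limit s ++ [limit]) := by
  set d : Int := limit - m with hd
  set n : Int := -(PySem.Int.floordiv (-d) s) with hndef
  have hn : (n - 1) * s < d ∧ d ≤ n * s :=
    (PySem.Int.neg_floordiv_neg_eq_iff_of_pos hs).mp hndef.symm
  have hd0 : 0 < d := by omega
  have hn1 : 1 ≤ n := by nlinarith [hn.2]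
  obtain ⟨j, hj⟩ : ∃ j : Nat, (j : Int) + 1 = n := ⟨(n - 1).toNat, by omega⟩
  -- left side: a map over List.range (j+2)
  rw [PySem.List.pyRange_one]
  have htn : (n + 1 - 0).toNat = j + 2 := by omega
  rw [htn, List.map_map]
  have hto : ((fun i => min (m + i * s) limit) ∘ fun k : Nat => 0 + (k : Int))
      = fun k : Nat => min (m + (k : Int) * s) limit := by
    funext k; simp [Function.comp]
  rw [hto]
  -- peel the last element (index j+1 = n) and the first (index 0)
  rw [List.range_succ, List.map_append, List.range_succ_eq_map, List.map_cons, List.map_map]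
  have hlast : min (m + ((j + 1 : Nat) : Int) * s) limit = limit := by
    have : limit ≤ m + n * s := by omega
    push_cast
    rw [hj]
    omega
  have hfirst : min (m + ((0 : Nat) : Int) * s) limit = m := by
    simp; omega
  -- right side: unfold pyRange with positive step; its length is j
  rw [PySem.List.pyRange_of_pos (m + s) limit hs]
  have hcnt : (if m + s < limit then ((limit - (m + s) + s - 1) / s).toNat else 0) = j := by
    by_cases hms : m + s < limit
    · rw [if_pos hms]
      have he : limit - (m + s) + s - 1 = d - 1 := by omega
      rw [he]
      have hle : n - 1 ≤ (d - 1) / s := by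
        rw [Int.le_ediv_iff_mul_le hs]; omega
      have hltq : (d - 1) / s < n := by
        rw [Int.ediv_lt_iff_lt_mul hs]; nlinarith [hn.2]
      omega
    · rw [if_neg hms]
      -- here d ≤ s, so n = 1 and j = 0
      have : n ≤ 1 := by nlinarith [hn.1]
      omega
  rw [hcnt]
  have hmid : List.map ((fun k : Nat => min (m + (k : Int) * s) limit) ∘ Nat.succ)
        (List.range j)
      = List.map (fun k : Nat => m + s + s * (k : Int)) (List.range j) := by
    apply List.map_congr_left
    intro k hk
    have hkj : (k : Int) < j := by exact_mod_cast List.mem_range.mp hk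
    have hub : m + ((k : Int) + 1) * s ≤ limit := by
      have h1 : (k : Int) + 1 ≤ n - 1 := by omega
      nlinarith [hn.1]
    simp only [Function.comp]
    push_cast
    rw [min_eq_left hub]
    ring
  rw [hmid, hfirst]
  simp only [List.map_cons, List.map_nil]
  rw [hlast]
  simp

-- ===== VERDICT (by name: the statement is the Claim_ definition above) =====
theorem get_sample_point_list_between_min_max_idx_spec : Claim_equal_get_sample_point_list_between_min_max_idx := by
  intro m M c s _ hpre
  unfold Spec_get_sample_point_list_between_min_max_idx
  unfold get_sample_point_list_between_min_max_idx get_sample_point_list_between_min_max_idx_alt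
  by_cases hge : M - c - m ≤ 0
  · rw [gsLoopA, dif_neg (by omega)]
    simp only []
    rw [if_pos hge]
  · have hs : 0 < s := by
      rcases hpre with h | h
      · omega
      · exact h
    have hlt : m < M - c := by omega
    rw [gsLoopA_eq (M - c) s hs m [m] hlt]
    simp only []
    rw [if_neg hge, mapform_eq m (M - c) s hs hlt]
    simp
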